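-- pv_equiv track=rewrite | github.com/alelizalde/python-algorithm-practices | am.py | ClosestXdestinations
-- ===== SOURCE A (Python) =====
-- def ClosestXdestinations(numDestinations, allLocations, numDeliveries):
--
--     route = {}
--     e = 1
--     for distance in allLocations:
--         value = (distance[0]**2)+(distance[1]**2)
--         route[value] = [distance[0], distance[1]]
--         e += 1
--
--     e = 1
--     final_route = []
--     for k, v in sorted(route.items()):
--         final_route.append(v)
--         if e >= numDeliveries:
--             break
--         else:
--             e+=1
--     pass
--
--     return final_route
-- ===== SOURCE B (Python) =====
-- def ClosestXdestinations(numDestinations, allLocations, numDeliveries):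
--     route = {loc[0] ** 2 + loc[1] ** 2: [loc[0], loc[1]] for loc in allLocations}
--     pairs = list(route.items())
--     count = min(numDeliveries, len(pairs))
--     out = []
--     while len(out) < count:
--         best = min(pairs, key=lambda p: p[0])
--         pairs.remove(best)
--         out.append(best[1])
--     return out
-- ===== Notes on version B (the rewrite author's own statement) =====
-- stated objective: alternative
-- what changed: B builds the deduplicating distance dict once and then extracts the numDeliveries closest entries by repeated minimum selection instead of fully sorting all distinct distances and breaking out of a counter loop, and it returns [] when numDeliveries <= 0.
-- intended difference: On numDeliveries <= 0 with a nonempty location list A still returns the single closest destination because its loop appends before testing the counter; B returns [], the intended result when zero deliveries are requested. — e.g. on ClosestXdestinations(1, [[1, 2]], 0): A returns [[1, 2]], B returns []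
import Mathlib
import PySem

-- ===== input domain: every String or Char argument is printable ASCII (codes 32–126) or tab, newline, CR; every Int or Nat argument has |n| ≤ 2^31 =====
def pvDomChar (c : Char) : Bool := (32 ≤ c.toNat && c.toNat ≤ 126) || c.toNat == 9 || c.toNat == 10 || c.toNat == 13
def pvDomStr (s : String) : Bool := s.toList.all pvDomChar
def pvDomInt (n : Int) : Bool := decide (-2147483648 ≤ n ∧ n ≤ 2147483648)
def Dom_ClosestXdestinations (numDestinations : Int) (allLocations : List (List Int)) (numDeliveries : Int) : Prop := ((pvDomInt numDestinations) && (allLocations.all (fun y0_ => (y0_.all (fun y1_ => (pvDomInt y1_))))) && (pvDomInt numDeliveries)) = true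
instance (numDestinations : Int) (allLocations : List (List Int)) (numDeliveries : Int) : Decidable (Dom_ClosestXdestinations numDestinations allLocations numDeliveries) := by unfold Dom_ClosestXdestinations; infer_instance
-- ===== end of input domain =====

-- B replaces A's full sort of the deduplicated distances by repeated minimum
-- extraction of just the first `numDeliveries` entries, and returns [] when
-- numDeliveries ≤ 0 (objective: alternative algorithm; no speed claim).

-- ===== PORT A =====
-- the loop 'for k, v in sorted(route.items()): append v; break when e >= numDeliveries'
def pvALoop (pairs : List (Int × List Int)) (e : Int) (numDeliveries : Int)
    (acc : List (List Int)) : List (List Int) :=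
  match pairs with
  | [] => acc
  | (_, v) :: rest =>
    let acc := acc ++ [v]
    if e ≥ numDeliveries then acc else pvALoop rest (e + 1) numDeliveries acc

def ClosestXdestinations (numDestinations : Int) (allLocations : List (List Int)) (numDeliveries : Int) : List (List Int) :=
  -- route = {}; e = 1; for distance in allLocations: value = d[0]**2+d[1]**2; route[value] = [d[0],d[1]]; e += 1
  let st := allLocations.foldl
    (fun (st : PySem.Dict Int (List Int) × Int) distance =>
      let value := (PySem.List.pyGetD distance 0 0) ^ 2 + (PySem.List.pyGetD distance 1 0) ^ 2
      (st.1.insert value [PySem.List.pyGetD distance 0 0, PySem.List.pyGetD distance 1 0], st.2 + 1))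
    (PySem.Dict.empty, 1)
  -- sorted(route.items()): dict keys are distinct, so Python's tuple comparison
  -- only ever reads the first component; exact here as sorting by the key.
  pvALoop (PySem.List.sorted st.1.items (fun p => p.1)) 1 numDeliveries []

-- ===== PORT B =====
-- route = {loc[0]**2 + loc[1]**2: [loc[0], loc[1]] for loc in allLocations}
def pvBBuild (allLocations : List (List Int)) : PySem.Dict Int (List Int) :=
  allLocations.foldl
    (fun d loc =>
      d.insert ((PySem.List.pyGetD loc 0 0) ^ 2 + (PySem.List.pyGetD loc 1 0) ^ 2)
        [PySem.List.pyGetD loc 0 0, PySem.List.pyGetD loc 1 0])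
    PySem.Dict.empty

-- while len(out) < count: best = min(pairs, key=fst); pairs.remove(best); out.append(best[1])
def pvBSelect (count : Nat) (pairs : List (Int × List Int)) : List (List Int) :=
  match count with
  | 0 => []
  | k + 1 =>
    match PySem.List.min? pairs (fun p => p.1) with
    | none => []
    | some best => best.2 :: pvBSelect k ((PySem.List.remove? pairs best).getD pairs)

def ClosestXdestinations_alt (numDestinations : Int) (allLocations : List (List Int)) (numDeliveries : Int) : List (List Int) :=
  let pairs := (pvBBuild allLocations).items
  let count := min numDeliveries (pairs.length : Int)
  pvBSelect count.toNat pairs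

-- ===== PRECONDITION & SPEC =====
-- A raises IndexError on a location list with fewer than two coordinates; excluded.
def Pre_ClosestXdestinations (numDestinations : Int) (allLocations : List (List Int)) (numDeliveries : Int) : Prop :=
  ∀ loc ∈ allLocations, 2 ≤ loc.length
instance (numDestinations : Int) (allLocations : List (List Int)) (numDeliveries : Int) : Decidable (Pre_ClosestXdestinations numDestinations allLocations numDeliveries) := by unfold Pre_ClosestXdestinations; infer_instance

def pvWitness_ClosestXdestinations : Int × List (List Int) × Int := (1, [[0, 1], [2, 3]], 1)

-- On numDeliveries ≤ 0 with a nonempty location list, A still returns the single closest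
-- destination (its loop appends before testing the counter), while B returns [] — the
-- intended result when zero or fewer deliveries are requested.
def D_ClosestXdestinations (numDestinations : Int) (allLocations : List (List Int)) (numDeliveries : Int) : Prop :=
  numDeliveries ≤ 0 ∧ allLocations ≠ []
instance (numDestinations : Int) (allLocations : List (List Int)) (numDeliveries : Int) : Decidable (D_ClosestXdestinations numDestinations allLocations numDeliveries) := by unfold D_ClosestXdestinations; infer_instance

def Spec_ClosestXdestinations (numDestinations : Int) (allLocations : List (List Int)) (numDeliveries : Int) (out : List (List Int)) : Prop := ¬ D_ClosestXdestinations numDestinations allLocations numDeliveries → out = ClosestXdestinations_alt numDestinations allLocations numDeliveries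
instance (numDestinations : Int) (allLocations : List (List Int)) (numDeliveries : Int) (out : List (List Int)) : Decidable (Spec_ClosestXdestinations numDestinations allLocations numDeliveries out) := by unfold Spec_ClosestXdestinations; infer_instance

def pvDiffWitness_ClosestXdestinations : Int × List (List Int) × Int := (1, [[1, 2]], 0)
def pvDiffWitnessOut_ClosestXdestinations : (List (List Int)) × (List (List Int)) := ([[1, 2]], [])

-- ===== CLAIM (what is proved, stated in full; the proofs are below) =====
def Claim_unchanged_ClosestXdestinations : Prop := ∀ (numDestinations : Int) (allLocations : List (List Int)) (numDeliveries : Int), Dom_ClosestXdestinations numDestinations allLocations numDeliveries → Pre_ClosestXdestinations numDestinations allLocations numDeliveries → Spec_ClosestXdestinations numDestinations allLocations numDeliveries (ClosestXdestinations numDestinations allLocations numDeliveries)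
def Claim_changed_ClosestXdestinations : Prop := Dom_ClosestXdestinations (pvDiffWitness_ClosestXdestinations.1) (pvDiffWitness_ClosestXdestinations.2.1) (pvDiffWitness_ClosestXdestinations.2.2) ∧ Pre_ClosestXdestinations (pvDiffWitness_ClosestXdestinations.1) (pvDiffWitness_ClosestXdestinations.2.1) (pvDiffWitness_ClosestXdestinations.2.2) ∧ D_ClosestXdestinations (pvDiffWitness_ClosestXdestinations.1) (pvDiffWitness_ClosestXdestinations.2.1) (pvDiffWitness_ClosestXdestinations.2.2) ∧ ClosestXdestinations (pvDiffWitness_ClosestXdestinations.1) (pvDiffWitness_ClosestXdestinations.2.1) (pvDiffWitness_ClosestXdestinations.2.2) = pvDiffWitnessOut_ClosestXdestinations.1 ∧ ClosestXdestinations_alt (pvDiffWitness_ClosestXdestinations.1) (pvDiffWitness_ClosestXdestinations.2.1) (pvDiffWitness_ClosestXdestinations.2.2) = pvDiffWitnessOut_ClosestXdestinations.2 ∧ pvDiffWitnessOut_ClosestXdestinations.1 ≠ pvDiffWitnessOut_ClosestXdestinations.2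
def Claim_exact_ClosestXdestinations : Prop := ∀ (numDestinations : Int) (allLocations : List (List Int)) (numDeliveries : Int), Dom_ClosestXdestinations numDestinations allLocations numDeliveries → Pre_ClosestXdestinations numDestinations allLocations numDeliveries → D_ClosestXdestinations numDestinations allLocations numDeliveries → ClosestXdestinations numDestinations allLocations numDeliveries ≠ ClosestXdestinations_alt numDestinations allLocations numDeliveries


-- ===== LEMMAS AND PROOFS =====

-- A's dict-building fold carries a dead counter e; its first component is B's dict.
theorem pv_fold_fst (l : List (List Int)) (d : PySem.Dict Int (List Int)) (e : Int) :
    (l.foldl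
      (fun (st : PySem.Dict Int (List Int) × Int) distance =>
        let value := (PySem.List.pyGetD distance 0 0) ^ 2 + (PySem.List.pyGetD distance 1 0) ^ 2
        (st.1.insert value [PySem.List.pyGetD distance 0 0, PySem.List.pyGetD distance 1 0], st.2 + 1))
      (d, e)).1
    = l.foldl
      (fun d loc =>
        d.insert ((PySem.List.pyGetD loc 0 0) ^ 2 + (PySem.List.pyGetD loc 1 0) ^ 2)
          [PySem.List.pyGetD loc 0 0, PySem.List.pyGetD loc 1 0]) d := by
  induction l generalizing d e with
  | nil => rfl
  | cons x xs ih => exact ih _ _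

theorem pvBSelect_nil (k : Nat) : pvBSelect k [] = [] := by
  cases k <;> simp [pvBSelect, PySem.List.min?]

-- A's counter loop over the sorted pairs takes the first numDeliveries values.
theorem pvALoop_eq (s : List (Int × List Int)) : ∀ (e n : Int) (acc : List (List Int)), e ≤ n →
    pvALoop s e n acc = acc ++ (s.take (n - e + 1).toNat).map (fun p => p.2) := by
  induction s with
  | nil => intro e n acc _; simp [pvALoop]
  | cons x rest ih =>
    intro e n acc he
    by_cases h : e ≥ n
    · have hen : e = n := le_antisymm he h
      have h1 : (n - e + 1).toNat = 1 := by omega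
      simp [pvALoop, h, h1]
    · have h1 : (n - e + 1).toNat = (n - (e + 1) + 1).toNat + 1 := by omega
      rw [pvALoop]
      simp only [h, if_false, ih (e + 1) n _ (by omega), h1, List.take_succ_cons, List.map_cons]
      simp

-- Repeated minimum extraction over pairs with distinct keys yields the values of the
-- first k entries of the key-sorted list.
theorem pvBSelect_eq (k : Nat) : ∀ pairs : List (Int × List Int), (pairs.map Prod.fst).Nodup →
    pvBSelect k pairs = ((PySem.List.sorted pairs (fun p => p.1)).take k).map (fun p => p.2) := by
  induction k with
  | zero => intro pairs _; simp [pvBSelect]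
  | succ k ih =>
    intro pairs hnd
    cases hmin : PySem.List.min? pairs (fun p => p.1) with
    | none =>
      have hnil : pairs = [] := (PySem.List.min?_eq_none_iff _ _).mp hmin
      subst hnil
      rw [(PySem.List.sorted_eq_nil_iff _ _ false).mpr rfl]
      simp [pvBSelect, PySem.List.min?]
    | some best =>
      have hmem : best ∈ pairs := PySem.List.min?_mem hmin
      have hne : pairs ≠ [] := by rintro rfl; simp at hmem
      obtain ⟨p, t, hs⟩ : ∃ p t, PySem.List.sorted pairs (fun p => p.1) = p :: t := by
        cases hq : PySem.List.sorted pairs (fun p => p.1) with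
        | nil => exact absurd ((PySem.List.sorted_eq_nil_iff pairs _ false).mp hq) hne
        | cons p t => exact ⟨p, t, rfl⟩
      have hperm : (p :: t).Perm pairs := hs ▸ PySem.List.sorted_perm pairs (fun p => p.1) false
      have hpm : p ∈ pairs := hperm.mem_iff.mp (by simp)
      have hble : best.1 ≤ p.1 := PySem.List.min?_isMin hmin p hpm
      have hple : p.1 ≤ best.1 := PySem.List.key_head_sorted_le pairs (fun p => p.1) hs best hmem
      have hbp : best = p := List.inj_on_of_nodup_map hnd hmem hpm (le_antisymm hble hple)
      subst hbp
      have hrem : PySem.List.remove? pairs best = some (pairs.erase best) :=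
        PySem.List.remove?_eq_some_erase pairs best hmem
      have hperm_er : (pairs.erase best).Perm t := by
        have h2 := hperm.symm.erase best
        rwa [List.erase_cons_head] at h2
      have hnd_er : ((pairs.erase best).map Prod.fst).Nodup :=
        hnd.sublist ((List.erase_sublist).map Prod.fst)
      have hnd_s : ((best :: t).map Prod.fst).Nodup := ((hperm.map Prod.fst).nodup_iff).mpr hnd
      have hpw_ne : (best :: t).Pairwise (fun a b => a.1 ≠ b.1) := by
        rw [List.nodup_iff_pairwise_ne, List.pairwise_map] at hnd_s
        exact hnd_s
      have hpw_le : (best :: t).Pairwise (fun a b => a.1 ≤ b.1) := hs ▸ PySem.List.sorted_pairwise pairs _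
      have hpw_lt : (best :: t).Pairwise (fun a b => a.1 < b.1) :=
        (hpw_le.and hpw_ne).imp (fun h => lt_of_le_of_ne h.1 h.2)
      have hsort_er : PySem.List.sorted (pairs.erase best) (fun p => p.1) = t :=
        PySem.List.sorted_eq_of_perm_of_pairwise_lt (pairs.erase best) t _ hperm_er.symm hpw_lt.of_cons
      rw [pvBSelect, hmin]
      simp only [hrem, Option.getD_some, ih _ hnd_er, hsort_er, hs, List.take_succ_cons,
        List.map_cons]

theorem pv_keys_nodup (locs : List (List Int)) : ((pvBBuild locs).items.map Prod.fst).Nodup := by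
  have h := PySem.Dict.nodup_keys_foldl_insert_key (ν := List Int) locs
    (fun loc => (PySem.List.pyGetD loc 0 0) ^ 2 + (PySem.List.pyGetD loc 1 0) ^ 2)
    (fun _ loc => [PySem.List.pyGetD loc 0 0, PySem.List.pyGetD loc 1 0])
    PySem.Dict.empty PySem.Dict.nodup_keys_empty
  simpa [PySem.Dict.keys, pvBBuild] using h

theorem ClosestXdestinations_spec : Claim_unchanged_ClosestXdestinations := by
  intro numDestinations allLocations numDeliveries _ _ hD
  simp only [ClosestXdestinations, ClosestXdestinations_alt]
  rw [pv_fold_fst]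
  by_cases hloc : allLocations = []
  · subst hloc
    have h1 : (PySem.Dict.empty (κ := Int) (ν := List Int)).items = [] := rfl
    simp [pvBBuild, h1, pvALoop, pvBSelect_nil, PySem.List.sorted]
  · have hn : 1 ≤ numDeliveries := by
      by_contra h
      exact hD ⟨by omega, hloc⟩
    rw [show (allLocations.foldl
        (fun d loc =>
          d.insert ((PySem.List.pyGetD loc 0 0) ^ 2 + (PySem.List.pyGetD loc 1 0) ^ 2)
            [PySem.List.pyGetD loc 0 0, PySem.List.pyGetD loc 1 0]) PySem.Dict.empty)
        = pvBBuild allLocations from rfl]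
    rw [pvALoop_eq _ 1 numDeliveries [] hn, pvBSelect_eq _ _ (pv_keys_nodup allLocations)]
    rw [List.nil_append]
    congr 1
    set s := PySem.List.sorted (pvBBuild allLocations).items (fun p => p.1) with hs
    have hlen : s.length = (pvBBuild allLocations).items.length :=
      PySem.List.length_sorted _ _ false
    by_cases hcase : numDeliveries ≤ ((pvBBuild allLocations).items.length : Int)
    · have : (min numDeliveries ((pvBBuild allLocations).items.length : Int)).toNat
          = (numDeliveries - 1 + 1).toNat := by omega
      rw [this]
    · have h1 : s.length ≤ (numDeliveries - 1 + 1).toNat := by omega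
      have h2 : s.length ≤ (min numDeliveries ((pvBBuild allLocations).items.length : Int)).toNat := by omega
      rw [List.take_of_length_le h1, List.take_of_length_le h2]

theorem ClosestXdestinations_changed : Claim_changed_ClosestXdestinations := by
  unfold Claim_changed_ClosestXdestinations; decide

theorem ClosestXdestinations_tight : Claim_exact_ClosestXdestinations := by
  intro numDestinations allLocations numDeliveries _ _ hD
  obtain ⟨hn, hne⟩ := hD
  -- B returns []
  have hB : ClosestXdestinations_alt numDestinations allLocations numDeliveries = [] := by
    simp only [ClosestXdestinations_alt]
    have h0 : (min numDeliveries (((pvBBuild allLocations).items.length : Int))).toNat = 0 := by omega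
    rw [h0]
    rfl
  -- A returns a nonempty list
  have hkeys : (pvBBuild allLocations).items ≠ [] := by
    intro hitems
    have hk : (pvBBuild allLocations).keys = PySem.Set.update PySem.Dict.empty.keys
        (allLocations.map (fun loc => (PySem.List.pyGetD loc 0 0) ^ 2 + (PySem.List.pyGetD loc 1 0) ^ 2)) :=
      PySem.Dict.keys_foldl_insert_key allLocations _
        (fun _ loc => [PySem.List.pyGetD loc 0 0, PySem.List.pyGetD loc 1 0]) PySem.Dict.empty
    obtain ⟨l0, rest, rfl⟩ : ∃ l0 rest, allLocations = l0 :: rest := by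
      cases allLocations with
      | nil => exact absurd rfl hne
      | cons a b => exact ⟨a, b, rfl⟩
    have hmem : ((PySem.List.pyGetD l0 0 0) ^ 2 + (PySem.List.pyGetD l0 1 0) ^ 2)
        ∈ (pvBBuild (l0 :: rest)).keys := by
      rw [hk]
      have : PySem.Set.update (PySem.Dict.empty (κ := Int) (ν := List Int)).keys
          ((l0 :: rest).map (fun loc => (PySem.List.pyGetD loc 0 0) ^ 2 + (PySem.List.pyGetD loc 1 0) ^ 2))
          = PySem.Set.ofList ((l0 :: rest).map (fun loc => (PySem.List.pyGetD loc 0 0) ^ 2 + (PySem.List.pyGetD loc 1 0) ^ 2)) := rfl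
      rw [this, PySem.Set.mem_ofList]
      simp
    rw [show (pvBBuild (l0 :: rest)).keys = (pvBBuild (l0 :: rest)).items.map Prod.fst from rfl,
      hitems] at hmem
    simp at hmem
  have hsne : PySem.List.sorted (pvBBuild allLocations).items (fun p => p.1) ≠ [] := by
    intro h
    exact hkeys ((PySem.List.sorted_eq_nil_iff _ _ false).mp h)
  obtain ⟨x, rest, hsx⟩ : ∃ x rest,
      PySem.List.sorted (pvBBuild allLocations).items (fun p => p.1) = x :: rest := by
    cases h : PySem.List.sorted (pvBBuild allLocations).items (fun p => p.1) with
    | nil => exact absurd h hsne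
    | cons a b => exact ⟨a, b, rfl⟩
  have hA : ClosestXdestinations numDestinations allLocations numDeliveries = [x.2] := by
    simp only [ClosestXdestinations]
    rw [pv_fold_fst]
    rw [show (allLocations.foldl
        (fun d loc =>
          d.insert ((PySem.List.pyGetD loc 0 0) ^ 2 + (PySem.List.pyGetD loc 1 0) ^ 2)
            [PySem.List.pyGetD loc 0 0, PySem.List.pyGetD loc 1 0]) PySem.Dict.empty)
        = pvBBuild allLocations from rfl]
    rw [hsx, pvALoop]
    simp [show (1 : Int) ≥ numDeliveries by omega]
  rw [hA, hB]
  simp
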